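-- pv_equiv track=rewrite | github.com/AaliyahSalia/CE450_HW2.py | bnc_bk_frth.py | bnc_bck_frth
-- ===== SOURCE A (Python) =====
-- def bnc_bck_frth(k):
--
--     count = 0
--     reset = False
--
--     for i in range(1, k+1):
--         if i % 7 == 0 or i % 10 == 7:
--             if reset == False:
--                 reset = True
--                 count += 2
--             else:
--                 reset = False
--                 count -= 2
--         if reset == True:
--             count -= 1
--         else:
--             count += 1
--     return count
-- ===== SOURCE B (Python) =====
-- def bnc_bck_frth(k):
--     # O(1): the loop body depends on i only through i % 70, and the toggled
--     # state returns to its start after each 70-step block, so simulate one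
--     # period once and combine full periods arithmetically with the remainder.
--     if k <= 0:
--         return 0
--     pref = [0]
--     c = 0
--     reset = False
--     for i in range(1, 71):
--         if i % 7 == 0 or i % 10 == 7:
--             if not reset:
--                 reset = True
--                 c += 2
--             else:
--                 reset = False
--                 c -= 2
--         c += -1 if reset else 1
--         pref.append(c)
--     q, r = divmod(k, 70)
--     return q * pref[70] + pref[r]
-- ===== Notes on version B (the rewrite author's own statement) =====
-- stated objective: faster
-- what changed: B replaces the O(k) loop by O(1) arithmetic: the loop body depends on i only through i mod 70 and the toggle state returns to False after each 70-step block, so B simulates a single 70-step period once, then combines full periods via divmod(k,70) with a precomputed prefix table for the remainder.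
import Mathlib
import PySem

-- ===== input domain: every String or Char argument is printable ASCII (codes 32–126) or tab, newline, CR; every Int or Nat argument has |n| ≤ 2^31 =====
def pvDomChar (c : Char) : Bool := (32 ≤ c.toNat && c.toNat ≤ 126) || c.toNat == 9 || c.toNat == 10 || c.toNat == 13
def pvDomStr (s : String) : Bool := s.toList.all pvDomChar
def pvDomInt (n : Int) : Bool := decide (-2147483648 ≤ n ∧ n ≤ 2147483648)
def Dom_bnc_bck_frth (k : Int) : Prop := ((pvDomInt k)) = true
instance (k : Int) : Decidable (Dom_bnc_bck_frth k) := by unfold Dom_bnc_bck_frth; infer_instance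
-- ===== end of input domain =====

-- B replaces A's O(k) loop by O(1) arithmetic over the period-70 structure (one simulated
-- period + divmod); proved to return exactly A's value for every k.

-- ===== PORT A =====
-- loop body of A: state (count, reset), loop variable i
def stepA (s : Int × Bool) (i : Int) : Int × Bool :=
  let t := if PySem.Int.mod i 7 == 0 || PySem.Int.mod i 10 == 7 then
             (if s.2 == false then (s.1 + 2, true) else (s.1 - 2, false))
           else s
  if t.2 == true then (t.1 - 1, t.2) else (t.1 + 1, t.2)

def bnc_bck_frth (k : Int) : Int :=
  ((PySem.List.pyRange 1 (k + 1) 1).foldl stepA (0, false)).1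

-- ===== PORT B =====
-- loop body of B: state (pref, c, reset)
def stepB (s : List Int × Int × Bool) (i : Int) : List Int × Int × Bool :=
  let t : Int × Bool :=
    if PySem.Int.mod i 7 == 0 || PySem.Int.mod i 10 == 7 then
      (if !s.2.2 then (s.2.1 + 2, true) else (s.2.1 - 2, false))
    else (s.2.1, s.2.2)
  let c := t.1 + (if t.2 then -1 else 1)
  (s.1 ++ [c], c, t.2)

def bnc_bck_frth_alt (k : Int) : Int :=
  if k ≤ 0 then 0
  else
    let st := (PySem.List.pyRange 1 71 1).foldl stepB ([0], 0, false)
    let pref := st.1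
    let q := PySem.Int.floordiv k 70
    let r := PySem.Int.mod k 70
    -- pref has 71 entries and 0 ≤ r < 70, so both indexings are in range (Python never raises here)
    q * (PySem.List.pyGet? pref 70).getD 0 + (PySem.List.pyGet? pref r).getD 0

-- ===== PRECONDITION & SPEC =====
def Spec_bnc_bck_frth (k : Int) (out : Int) : Prop := out = bnc_bck_frth_alt k
instance (k : Int) (out : Int) : Decidable (Spec_bnc_bck_frth k out) := by unfold Spec_bnc_bck_frth; infer_instance

-- ===== CLAIM (what is proved, stated in full; the proofs are below) =====
def Claim_equal_bnc_bck_frth : Prop := ∀ (k : Int), Dom_bnc_bck_frth k → Spec_bnc_bck_frth k (bnc_bck_frth k)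

-- ===== LEMMAS AND PROOFS =====

-- `run a n s` folds stepA over the n indices a, a+1, …, a+n-1 starting from state s
def run (a : Int) : Nat → (Int × Bool) → Int × Bool
  | 0, s => s
  | n + 1, s => run (a + 1) n (stepA s a)

theorem run_append (m n : Nat) (a : Int) (s : Int × Bool) :
    run a (m + n) s = run (a + (m : Int)) n (run a m s) := by
  induction m generalizing a s with
  | zero => simp [run]
  | succ m ih =>
    have e1 : run a (m + 1 + n) s = run (a + 1) (m + n) (stepA s a) := by
      rw [show m + 1 + n = (m + n) + 1 from by omega]; rfl
    have e2 : run a (m + 1) s = run (a + 1) m (stepA s a) := rfl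
    rw [e1, ih, e2]
    congr 1
    push_cast; ring

theorem run_succ_right (a : Int) (n : Nat) (s : Int × Bool) :
    run a (n + 1) s = stepA (run a n s) (a + n) := by
  rw [run_append n 1 a s]; simp [run]

theorem stepA_mod70 (s : Int × Bool) (i : Int) : stepA s (i + 70) = stepA s i := by
  have h7 : PySem.Int.mod (i + 70) 7 = PySem.Int.mod i 7 := by
    rw [PySem.Int.mod_eq_emod_of_pos (by norm_num), PySem.Int.mod_eq_emod_of_pos (by norm_num)]
    omega
  have h10 : PySem.Int.mod (i + 70) 10 = PySem.Int.mod i 10 := by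
    rw [PySem.Int.mod_eq_emod_of_pos (by norm_num), PySem.Int.mod_eq_emod_of_pos (by norm_num)]
    omega
  simp only [stepA]
  rw [h7, h10]

theorem run_shift70 (n : Nat) (a : Int) (s : Int × Bool) :
    run (a + 70) n s = run a n s := by
  induction n generalizing a s with
  | zero => simp [run]
  | succ n ih =>
    simp only [run, stepA_mod70]
    rw [show a + 70 + 1 = (a + 1) + 70 from by ring, ih]

theorem run_shift70mul (q n : Nat) (a : Int) (s : Int × Bool) :
    run (a + 70 * (q : Int)) n s = run a n s := by
  induction q with
  | zero => simp
  | succ q ih =>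
    have e : a + 70 * ((q + 1 : Nat) : Int) = (a + 70 * (q : Int)) + 70 := by push_cast; ring
    rw [e, run_shift70, ih]

set_option maxRecDepth 4000 in
theorem run_period : run 1 70 (0, false) = (0, false) := by decide

theorem run_periods (q : Nat) : run 1 (70 * q) (0, false) = (0, false) := by
  induction q with
  | zero => simp [run]
  | succ q ih =>
    rw [show 70 * (q + 1) = 70 * q + 70 from by ring, run_append, ih,
      show (1 : Int) + (70 * q : Nat) = 1 + 70 * (q : Int) from by push_cast; ring,
      run_shift70mul, run_period]

theorem run_split (q r : Nat) : run 1 (70 * q + r) (0, false) = run 1 r (0, false) := by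
  rw [run_append, run_periods,
    show (1 : Int) + (70 * q : Nat) = 1 + 70 * (q : Int) from by push_cast; ring,
    run_shift70mul]

theorem foldl_range_run (n : Nat) (a : Int) (s : Int × Bool) :
    (List.range n).foldl (fun (s : Int × Bool) (j : Nat) => stepA s (a + (j : Int))) s = run a n s := by
  induction n with
  | zero => simp [run]
  | succ n ih => rw [List.range_succ, List.foldl_append, ih, run_succ_right]; rfl

theorem a_eq_run (k : Int) : bnc_bck_frth k = (run 1 k.toNat (0, false)).1 := by
  unfold bnc_bck_frth
  rw [PySem.List.pyRange_one]
  simp only [List.foldl_map]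
  rw [show k + 1 - 1 = k from by ring]
  exact congrArg Prod.fst (foldl_range_run k.toNat 1 (0, false))

-- pref is a closed term; its entries are the prefix sums of a single period
set_option maxRecDepth 40000 in
theorem pref_get : ∀ r : Nat, r < 71 →
    (PySem.List.pyGet? ((PySem.List.pyRange 1 71 1).foldl stepB ([0], 0, false)).1 (r : Int)).getD 0
      = (run 1 r (0, false)).1 := by decide

-- ===== VERDICT (by name: the statement is the Claim_ definition above) =====
theorem bnc_bck_frth_spec : Claim_equal_bnc_bck_frth := by
  intro k _
  unfold Spec_bnc_bck_frth bnc_bck_frth_alt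
  by_cases hk : k ≤ 0
  · rw [if_pos hk, a_eq_run, show k.toNat = 0 from by omega]
    simp [run]
  · rw [if_neg hk]
    set q := PySem.Int.floordiv k 70 with hq
    set r := PySem.Int.mod k 70 with hr
    have hsplit : q * 70 + r = k := PySem.Int.floordiv_mul_add_mod k 70
    have hre : r = k % 70 := by rw [hr, PySem.Int.mod_eq_emod_of_pos (by norm_num)]
    have hrb : 0 ≤ r ∧ r < 70 := by constructor <;> omega
    have hq0 : 0 ≤ q := by omega
    have hkn : k.toNat = 70 * q.toNat + r.toNat := by omega
    rw [a_eq_run, hkn, run_split]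
    have h70 := pref_get 70 (by omega)
    have hrr := pref_get r.toNat (by omega)
    rw [show ((70 : Nat) : Int) = (70 : Int) from by norm_num] at h70
    rw [show ((r.toNat : Nat) : Int) = r from by omega] at hrr
    show (run 1 r.toNat (0, false)).1 =
      q * (PySem.List.pyGet? ((PySem.List.pyRange 1 71 1).foldl stepB ([0], 0, false)).1 70).getD 0
        + (PySem.List.pyGet? ((PySem.List.pyRange 1 71 1).foldl stepB ([0], 0, false)).1 r).getD 0
    rw [h70, hrr, run_period]
    simp
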